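-- pv_equiv track=rewrite | github.com/TomBenRu/advent_of_code_2025 | day_11/solve_part_1.py | precompute_reachable_targets
-- ===== SOURCE A (Python) =====
-- def precompute_reachable_targets(
--         devices: dict[str, list[str]],
--         targets: set[str]
-- ) -> dict[str, set[str]]:
--     """
--     Berechnet für jeden Knoten, welche Ziele (targets) von dort erreichbar sind.
--     Nutzt Rückwärts-BFS von jedem Target.
--     """
--     # Invertierter Graph: Wer zeigt auf wen?
--     reverse_graph = {node: [] for node in devices}
--     for source, neighbors in devices.items():
--         for neighbor in neighbors:
--             if neighbor in reverse_graph: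
--                 reverse_graph[neighbor].append(source)
--
--     reachable = {node: set() for node in devices}
--
--     for target in targets:
--         if target not in reverse_graph:
--             continue
--
--         # BFS rückwärts vom Target
--         visited = {target}
--         queue = [target]
--
--         while queue:
--             node = queue.pop(0)
--             reachable[node].add(target)
--
--             for predecessor in reverse_graph.get(node, []):
--                 if predecessor not in visited:
--                     visited.add(predecessor)
--                     queue.append(predecessor)
--
--     return reachable
-- ===== SOURCE B (Python) =====
-- def precompute_reachable_targets(
--         devices: dict[str, list[str]],
--         targets: set[str]
-- ) -> dict[str, set[str]]:
--     """Kleene-style saturation of per-node reachable sets: reach[n] starts as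
--     {n} and is repeatedly enlarged with reach[nb] for every device neighbour nb,
--     sweeping until a fixpoint (at most len(devices) sweeps are ever needed);
--     finally each set is intersected with the relevant targets (reach[n] only
--     holds device nodes, so targets outside the device dict are dropped once
--     up front). No BFS, no queue, no reverse graph."""
--     reach = {n: {n} for n in devices}
--     for _ in range(len(devices)):
--         changed = False
--         for n in devices:
--             for nb in devices[n]:
--                 if nb in reach and not reach[nb] <= reach[n]:
--                     reach[n] |= reach[nb]
--                     changed = True
--         if not changed:
--             break
--     valid = [t for t in targets if t in reach]
--     return {n: {t for t in valid if t in reach[n]} for n in devices}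
-- ===== Notes on version B (the rewrite author's own statement) =====
-- stated objective: alternative
-- what changed: B drops the reverse graph and the per-target backward BFS entirely: it saturates per-node reachable sets by Kleene-style fixpoint iteration (sweeps of 'reach[n] |= reach[nb]' until a sweep changes nothing, at most len(devices) sweeps) and then intersects each set with the targets; no queue, no visited set, no graph inversion.
import Mathlib
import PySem

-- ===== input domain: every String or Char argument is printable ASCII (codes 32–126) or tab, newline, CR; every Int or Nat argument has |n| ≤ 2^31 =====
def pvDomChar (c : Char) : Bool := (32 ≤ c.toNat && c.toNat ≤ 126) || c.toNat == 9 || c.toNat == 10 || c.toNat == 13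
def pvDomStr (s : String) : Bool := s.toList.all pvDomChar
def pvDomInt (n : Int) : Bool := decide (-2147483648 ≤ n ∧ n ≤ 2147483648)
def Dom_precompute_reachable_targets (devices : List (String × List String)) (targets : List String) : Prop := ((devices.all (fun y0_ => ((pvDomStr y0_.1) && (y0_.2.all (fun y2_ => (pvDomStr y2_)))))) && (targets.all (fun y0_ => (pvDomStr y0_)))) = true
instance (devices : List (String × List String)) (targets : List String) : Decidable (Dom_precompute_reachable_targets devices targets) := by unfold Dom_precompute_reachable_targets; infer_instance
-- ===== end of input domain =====

-- B replaces A's reverse-graph construction and per-target backward BFS by a Kleene-style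
-- fixpoint saturation of per-node reachable sets (no queue, no reverse graph); equal output
-- on dict/set-shaped inputs (Pre_).

-- ===== PORT A =====
-- measure helpers, used only for the termination of A's BFS loop (cited in decreasing_by)
def pvComp (U : List String) (visited : List String) : Nat :=
  (U.filter (fun x => !visited.contains x)).length

theorem pvComp_drop (U : List String) (Δ : List String) (v : List String)
    (hnd : Δ.Nodup) (hmem : ∀ p ∈ Δ, p ∈ U ∧ p ∉ v) :
    pvComp U (v ++ Δ) + Δ.length ≤ pvComp U v := by
  induction Δ generalizing v with
  | nil => simp
  | cons p Δ ih =>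
    have hp := hmem p (by simp)
    have h1 : pvComp U (v ++ [p]) + 1 ≤ pvComp U v := by
      have hsub : pvComp U (v ++ [p])
          = ((U.filter (fun x => !v.contains x)).filter (fun x => !(x == p))).length := by
        unfold pvComp
        rw [List.filter_filter]
        congr 1
        apply List.filter_congr
        intro x _
        by_cases hxp : x = p <;> by_cases hxv : x ∈ v <;> simp [hxp, hxv]
      have hlt : ((U.filter (fun x => !v.contains x)).filter (fun x => !(x == p))).length
          < (U.filter (fun x => !v.contains x)).length := by
        apply List.length_filter_lt_length_iff_exists.mpr
        exact ⟨p, by simpa using hp, by simp⟩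
      unfold pvComp at *
      omega
    have h2 := ih (v := v ++ [p]) (by simp_all) (by
      intro q hq
      have := hmem q (by simp [hq])
      have hqp : q ≠ p := by rintro rfl; simp_all
      simp_all)
    have e : v ++ p :: Δ = (v ++ [p]) ++ Δ := by simp
    rw [e, List.length_cons]
    omega

-- one BFS step of A: scan the predecessors of the popped node, enqueueing unvisited ones
def pvFoldStepA (rg : PySem.Dict String (List String)) (node : String)
    (visited : PySem.Set String) (rest : List String) : PySem.Set String × List String :=
  (rg.getD node []).foldl
    (fun vq pred =>
      if vq.1.contains pred then vq else (PySem.Set.add vq.1 pred, vq.2 ++ [pred]))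
    (visited, rest)

theorem pvFoldA_ex (l : List String) (v : PySem.Set String) (q : List String) :
    ∃ Δ : List String,
      l.foldl (fun vq pred =>
        if vq.1.contains pred then vq else (PySem.Set.add vq.1 pred, vq.2 ++ [pred])) (v, q)
        = (v ++ Δ, q ++ Δ) ∧ Δ.Nodup ∧ (∀ p ∈ Δ, p ∈ l ∧ p ∉ v) ∧
        (∀ p ∈ l, p ∈ v ++ Δ) := by
  induction l generalizing v q with
  | nil => exact ⟨[], by simp⟩
  | cons p l ih =>
    by_cases hp : p ∈ v
    · obtain ⟨Δ, h1, h2, h3, h4⟩ := ih (v := v) (q := q)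
      refine ⟨Δ, ?_, h2, fun x hx => ⟨by simp [(h3 x hx).1], (h3 x hx).2⟩, ?_⟩
      · simpa [List.foldl_cons, hp] using h1
      · intro x hx
        rcases List.mem_cons.mp hx with rfl | hx
        · simp [hp]
        · exact h4 x hx
    · obtain ⟨Δ, h1, h2, h3, h4⟩ := ih (v := v ++ [p]) (q := q ++ [p])
      have hadd : PySem.Set.add v p = v ++ [p] := by
        simp [PySem.Set.add, hp]
      refine ⟨p :: Δ, ?_, ?_, ?_, ?_⟩
      · simpa [List.foldl_cons, hp, hadd] using h1
      · have : p ∉ Δ := fun hpΔ => (h3 p hpΔ).2 (by simp)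
        simp [h2, this]
      · intro x hx
        rcases List.mem_cons.mp hx with rfl | hx
        · exact ⟨by simp, hp⟩
        · obtain ⟨hxl, hxv⟩ := h3 x hx
          exact ⟨by simp [hxl], fun hv => hxv (by simp [hv])⟩
      · intro x hx
        rcases List.mem_cons.mp hx with rfl | hx
        · simp
        · have := h4 x hx
          simpa [List.append_assoc] using this

theorem pvMem_getD_values (rg : PySem.Dict String (List String)) (node : String)
    (p : String) (hp : p ∈ rg.getD node []) : p ∈ rg.values.flatten := by
  rw [PySem.Dict.getD_eq_get?_getD] at hp
  cases hget : rg.get? node with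
  | none => rw [hget] at hp; simp at hp
  | some l =>
    rw [hget] at hp
    simp only [Option.getD_some] at hp
    have hi := PySem.Dict.mem_items_of_get?_eq_some (d := rg) hget
    refine List.mem_flatten.mpr ⟨l, ?_, hp⟩
    simp only [PySem.Dict.values]
    exact List.mem_map.mpr ⟨(node, l), hi, rfl⟩

theorem pvStepA_dec (rg : PySem.Dict String (List String)) (node : String)
    (visited : PySem.Set String) (rest : List String) :
    (pvFoldStepA rg node visited rest).2.length
      + pvComp rg.values.flatten (pvFoldStepA rg node visited rest).1
      ≤ rest.length + pvComp rg.values.flatten visited := by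
  obtain ⟨Δ, h1, h2, h3, _⟩ := pvFoldA_ex (rg.getD node []) visited rest
  unfold pvFoldStepA
  rw [h1]
  have := pvComp_drop rg.values.flatten Δ visited h2
    (fun p hp => ⟨pvMem_getD_values rg node p (h3 p hp).1, (h3 p hp).2⟩)
  simp only [List.length_append]
  omega

def pvBfsA (rg : PySem.Dict String (List String)) (target : String)
    (visited : PySem.Set String) (queue : List String)
    (reachable : PySem.Dict String (PySem.Set String)) :
    PySem.Dict String (PySem.Set String) :=
  match queue with
  | [] => reachable
  | node :: rest =>
      pvBfsA rg target
        (pvFoldStepA rg node visited rest).1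
        (pvFoldStepA rg node visited rest).2
        (reachable.modify node [] (fun s => PySem.Set.add s target))
termination_by queue.length + pvComp rg.values.flatten visited
decreasing_by
  have := pvStepA_dec rg node visited rest
  simp only [List.length_cons]
  omega

-- the reverse graph of A ({node: [] for node in devices}, then appending sources)
def pvRevGraph (devices : List (String × List String)) : PySem.Dict String (List String) :=
  (devices.foldl (fun rg p =>
      p.2.foldl (fun rg neighbor =>
        if rg.contains neighbor then rg.modify neighbor [] (fun l => l ++ [p.1]) else rg) rg)
    (devices.foldl (fun d p => d.insert p.1 []) PySem.Dict.empty))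

def precompute_reachable_targets (devices : List (String × List String))
    (targets : List String) : List (String × List String) :=
  let rg := pvRevGraph devices
  let reachable0 : PySem.Dict String (PySem.Set String) :=
    devices.foldl (fun d p => d.insert p.1 PySem.Set.empty) PySem.Dict.empty
  (targets.foldl (fun reachable target =>
      if rg.contains target then
        pvBfsA rg target (PySem.Set.ofList [target]) [target] reachable
      else reachable) reachable0).items

-- ===== PORT B =====
-- 'for nb in devices[n]: if nb in reach and not reach[nb] <= reach[n]: reach[n] |= reach[nb]; changed = True'
-- (the final dict intersects each reach[n] with 'valid', the targets that are device nodes)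
def pvFoldNb (n : String) (L : List String)
    (st : PySem.Dict String (PySem.Set String) × Bool) :
    PySem.Dict String (PySem.Set String) × Bool :=
  L.foldl (fun st nb =>
    if st.1.contains nb && !(PySem.Set.issubset (st.1.getD nb []) (st.1.getD n [])) then
      (st.1.modify n [] (fun s => PySem.Set.update s (st.1.getD nb [])), true)
    else st) st

def precompute_reachable_targets_alt (devices : List (String × List String))
    (targets : List String) : List (String × List String) :=
  let dev := PySem.Dict.mk devices
  let reach0 : PySem.Dict String (PySem.Set String) :=
    devices.foldl (fun d p => d.insert p.1 (PySem.Set.ofList [p.1])) PySem.Dict.empty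
  -- the Bool in the state is 'the loop has already been left by break'
  let reach := ((List.range devices.length).foldl
      (fun st _ => if st.2 then st
        else
          let sw := devices.foldl (fun st p => pvFoldNb p.1 (dev.getD p.1 []) st) (st.1, false)
          (sw.1, !sw.2))
      (reach0, false)).1
  let valid := targets.filter (fun t => reach.contains t)
  (devices.foldl (fun res p =>
      res.insert p.1
        (PySem.Set.ofList (valid.filter (fun t => (reach.getD p.1 []).contains t))))
    PySem.Dict.empty).items

-- ===== PRECONDITION & SPEC =====
-- Pre_: the two arguments encode a Python dict and a Python set, so the device keys and the
-- targets are distinct; duplicate-carrying lists correspond to no actual Python input of A.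
def Pre_precompute_reachable_targets (devices : List (String × List String))
    (targets : List String) : Prop :=
  (devices.map (fun p => p.1)).Nodup ∧ targets.Nodup

instance (devices : List (String × List String)) (targets : List String) :
    Decidable (Pre_precompute_reachable_targets devices targets) := by
  unfold Pre_precompute_reachable_targets; infer_instance

def pvWitness_precompute_reachable_targets : (List (String × List String)) × List String :=
  ([("a", ["b"]), ("b", ["c"])], ["b"])

def Spec_precompute_reachable_targets (devices : List (String × List String)) (targets : List String) (out : List (String × List String)) : Prop := out = precompute_reachable_targets_alt devices targets
instance (devices : List (String × List String)) (targets : List String) (out : List (String × List String)) : Decidable (Spec_precompute_reachable_targets devices targets out) := by unfold Spec_precompute_reachable_targets; infer_instance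

-- ===== CLAIM (what is proved, stated in full; the proofs are below) =====
def Claim_equal_precompute_reachable_targets : Prop := ∀ (devices : List (String × List String)) (targets : List String), Dom_precompute_reachable_targets devices targets → Pre_precompute_reachable_targets devices targets → Spec_precompute_reachable_targets devices targets (precompute_reachable_targets devices targets)

-- ===== LEMMAS AND PROOFS =====

-- ----- basic facts about Dict.mk and the reverse graph -----
theorem pvContains_mk_mem (devices : List (String × List String)) (t : String) :
    (PySem.Dict.mk devices).contains t = true ↔ t ∈ devices.map (fun p => p.1) := by
  rw [PySem.Dict.contains_iff_mem_keys]
  simp [PySem.Dict.keys]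

theorem pvMem_getD_mk_keys (devices : List (String × List String)) (x y : String)
    (h : y ∈ (PySem.Dict.mk devices).getD x []) : x ∈ devices.map (fun p => p.1) := by
  rw [PySem.Dict.getD_eq_get?_getD] at h
  cases hget : (PySem.Dict.mk devices).get? x with
  | none => rw [hget] at h; simp at h
  | some l =>
    have hi := PySem.Dict.mem_items_of_get?_eq_some (d := PySem.Dict.mk devices) hget
    exact List.mem_map.mpr ⟨(x, l), hi, rfl⟩

theorem pvGetD_mk_of_mem (devices : List (String × List String))
    (hnd : (devices.map (fun p => p.1)).Nodup) (pr : String × List String)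
    (hpr : pr ∈ devices) : (PySem.Dict.mk devices).getD pr.1 [] = pr.2 := by
  have hkeys : (PySem.Dict.mk devices).keys.Nodup := by
    simpa [PySem.Dict.keys, PySem.Dict.items] using hnd
  exact PySem.Dict.getD_of_mem_items _ (by simpa [PySem.Dict.items] using hpr) hkeys []

-- ----- characterization of the reverse graph built by A -----
theorem pvRevInner_char (s0 : String) (nbrs : List String)
    (d : PySem.Dict String (List String)) (t x : String) :
    ((nbrs.foldl (fun rg neighbor =>
        if rg.contains neighbor then rg.modify neighbor [] (fun l => l ++ [s0]) else rg)
        d).contains t = d.contains t) ∧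
    (x ∈ (nbrs.foldl (fun rg neighbor =>
        if rg.contains neighbor then rg.modify neighbor [] (fun l => l ++ [s0]) else rg)
        d).getD t [] ↔ x ∈ d.getD t [] ∨ (x = s0 ∧ d.contains t = true ∧ t ∈ nbrs)) := by
  induction nbrs generalizing d with
  | nil => simp
  | cons n rest ih =>
    by_cases hn : d.contains n = true
    · have ihd := ih (d := d.modify n [] (fun l => l ++ [s0]))
      rw [List.foldl_cons, if_pos hn]
      constructor
      · rw [ihd.1, PySem.Dict.contains_modify]
        by_cases htn : t = n
        · subst htn; simp [hn]
        · simp [htn]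
      · rw [ihd.2, PySem.Dict.getD_modify, PySem.Dict.contains_modify]
        by_cases htn : t = n
        · subst htn; simp [hn]; tauto
        · simp [htn]
    · rw [List.foldl_cons, if_neg (by simp [hn])]
      refine ⟨(ih d).1, ?_⟩
      rw [(ih d).2]
      have hn' : d.contains n = false := by simpa using hn
      constructor
      · rintro (h | ⟨rfl, hc, hr⟩)
        · exact Or.inl h
        · exact Or.inr ⟨rfl, hc, by simp [hr]⟩
      · rintro (h | ⟨rfl, hc, hr⟩)
        · exact Or.inl h
        · rcases List.mem_cons.mp hr with h' | h'
          · subst h'; rw [hc] at hn'; cases hn'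
          · exact Or.inr ⟨rfl, hc, h'⟩

theorem pvRevOuter_char (ps : List (String × List String))
    (d : PySem.Dict String (List String)) (t x : String) :
    ((ps.foldl (fun rg p =>
        p.2.foldl (fun rg neighbor =>
          if rg.contains neighbor then rg.modify neighbor [] (fun l => l ++ [p.1]) else rg) rg)
        d).contains t = d.contains t) ∧
    (x ∈ (ps.foldl (fun rg p =>
        p.2.foldl (fun rg neighbor =>
          if rg.contains neighbor then rg.modify neighbor [] (fun l => l ++ [p.1]) else rg) rg)
        d).getD t [] ↔
      x ∈ d.getD t [] ∨ (d.contains t = true ∧ ∃ pr ∈ ps, pr.1 = x ∧ t ∈ pr.2)) := by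
  induction ps generalizing d with
  | nil => simp
  | cons p rest ih =>
    rw [List.foldl_cons]
    have hin := pvRevInner_char p.1 p.2 d t x
    have ihd := ih (d := p.2.foldl (fun rg neighbor =>
      if rg.contains neighbor then rg.modify neighbor [] (fun l => l ++ [p.1]) else rg) d)
    refine ⟨by rw [ihd.1, hin.1], ?_⟩
    rw [ihd.2, hin.2, hin.1]
    constructor
    · rintro ((h | ⟨rfl, hc, hr⟩) | ⟨hc, pr, hpr, rfl, hm⟩)
      · exact Or.inl h
      · exact Or.inr ⟨hc, p, by simp, rfl, hr⟩
      · exact Or.inr ⟨hc, pr, by simp [hpr], rfl, hm⟩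
    · rintro (h | ⟨hc, pr, hpr, rfl, hm⟩)
      · exact Or.inl (Or.inl h)
      · rcases List.mem_cons.mp hpr with rfl | hpr
        · exact Or.inl (Or.inr ⟨rfl, hc, hm⟩)
        · exact Or.inr ⟨hc, pr, hpr, rfl, hm⟩

-- the seed dict {node: v0 for node in devices}: keys and values
theorem pvSeed_getD {ν : Type} (ps : List (String × List String)) (v0 : ν) (d0 : ν)
    (d : PySem.Dict String ν) (k : String)
    (h : d.getD k d0 = v0 ∨ d.getD k d0 = d0) :
    (ps.foldl (fun d p => d.insert p.1 v0) d).getD k d0 = v0 ∨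
      (ps.foldl (fun d p => d.insert p.1 v0) d).getD k d0 = d0 := by
  induction ps generalizing d with
  | nil => exact h
  | cons p rest ih =>
    rw [List.foldl_cons]
    refine ih (d := d.insert p.1 v0) ?_
    rw [PySem.Dict.getD_insert]
    by_cases hk : k = p.1 <;> simp [hk, h]

theorem pvSeed_contains {ν : Type} (ps : List (String × List String)) (v0 : ν)
    (d : PySem.Dict String ν) (k : String) :
    (ps.foldl (fun d p => d.insert p.1 v0) d).contains k
      = (k ∈ ps.map (fun p => p.1) || d.contains k) := by
  induction ps generalizing d with
  | nil => simp
  | cons p rest ih =>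
    rw [List.foldl_cons, ih, PySem.Dict.contains_insert]
    by_cases hk : k = p.1
    · simp [hk]
    · have : (k == p.1) = false := by simpa using hk
      have h2 : decide (k ∈ List.map (fun p => p.1) (p :: rest))
          = decide (k ∈ List.map (fun p => p.1) rest) := by simp [hk]
      rw [h2, this]
      simp

-- reverse-graph facts, packaged
theorem pvRG_contains (devices : List (String × List String)) (t : String) :
    (pvRevGraph devices).contains t = (PySem.Dict.mk devices).contains t := by
  unfold pvRevGraph
  rw [(pvRevOuter_char devices _ t t).1, pvSeed_contains]
  by_cases h : t ∈ devices.map (fun p => p.1)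
  · simp only [h, decide_true, Bool.true_or]
    exact ((pvContains_mk_mem devices t).mpr h).symm
  · simp only [h, decide_false, Bool.false_or, PySem.Dict.contains_empty]
    exact (Bool.eq_false_iff.mpr (fun hc => h ((pvContains_mk_mem devices t).mp hc))).symm

-- ----- the restricted forward edge relation -----
def pvE (dev : PySem.Dict String (List String)) (a b : String) : Prop :=
  b ∈ dev.getD a [] ∧ dev.contains b = true

theorem pvSeed_getD_nil (devices : List (String × List String)) (t : String) :
    (devices.foldl (fun d p => d.insert p.1 ([] : List String)) PySem.Dict.empty).getD t []
      = [] := by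
  rcases pvSeed_getD devices ([] : List String) [] PySem.Dict.empty t
    (Or.inr (by simp [PySem.Dict.getD_empty])) with h | h <;> exact h

theorem pvRG_mem (devices : List (String × List String))
    (hnd : (devices.map (fun p => p.1)).Nodup) (t x : String) :
    x ∈ (pvRevGraph devices).getD t [] ↔ pvE (PySem.Dict.mk devices) x t := by
  unfold pvRevGraph
  rw [(pvRevOuter_char devices _ t x).2]
  rw [pvSeed_getD_nil, pvSeed_contains]
  simp only [PySem.Dict.contains_empty, Bool.or_false, List.not_mem_nil, false_or]
  constructor
  · rintro ⟨hc, pr, hpr, rfl, hm⟩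
    refine ⟨?_, (pvContains_mk_mem devices t).mpr (by simpa using hc)⟩
    rw [pvGetD_mk_of_mem devices hnd pr hpr]
    exact hm
  · rintro ⟨hm, hc⟩
    have hx : (PySem.Dict.mk devices).get? x ≠ none := by
      intro hno
      rw [PySem.Dict.getD_eq_get?_getD, hno] at hm
      simp at hm
    obtain ⟨l, hl⟩ := Option.ne_none_iff_exists'.mp hx
    have hitems : (x, l) ∈ devices := by
      have := (PySem.Dict.get?_eq_some_iff_mem_items (PySem.Dict.mk devices) x l
        (by simpa [PySem.Dict.keys, PySem.Dict.items] using hnd)).mp hl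
      simpa [PySem.Dict.items] using this
    refine ⟨by simpa using (pvContains_mk_mem devices t).mp hc, (x, l), hitems, rfl, ?_⟩
    rw [PySem.Dict.getD_eq_get?_getD, hl] at hm
    simpa using hm

-- ----- A's BFS: the visited set and the pop sequence -----
def pvVisA (rg : PySem.Dict String (List String))
    (visited : PySem.Set String) (queue : List String) : PySem.Set String :=
  match queue with
  | [] => visited
  | node :: rest =>
      pvVisA rg (pvFoldStepA rg node visited rest).1 (pvFoldStepA rg node visited rest).2
termination_by queue.length + pvComp rg.values.flatten visited
decreasing_by
  have := pvStepA_dec rg node visited rest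
  simp only [List.length_cons]
  omega

def pvPopA (rg : PySem.Dict String (List String))
    (visited : PySem.Set String) (queue : List String) : List String :=
  match queue with
  | [] => []
  | node :: rest =>
      node :: pvPopA rg (pvFoldStepA rg node visited rest).1 (pvFoldStepA rg node visited rest).2
termination_by queue.length + pvComp rg.values.flatten visited
decreasing_by
  have := pvStepA_dec rg node visited rest
  simp only [List.length_cons]
  omega

theorem pvBfsA_decomp (rg : PySem.Dict String (List String)) (t : String)
    (v : PySem.Set String) (q : List String)
    (r : PySem.Dict String (PySem.Set String)) :
    pvBfsA rg t v q r
      = (pvPopA rg v q).foldl (fun r n => r.modify n [] (fun s => PySem.Set.add s t)) r := by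
  induction v, q using pvPopA.induct rg generalizing r with
  | case1 v => simp [pvBfsA, pvPopA]
  | case2 v node rest ih =>
    rw [pvBfsA, pvPopA, List.foldl_cons, ih]

theorem pvVisA_pop (rg : PySem.Dict String (List String))
    (v : PySem.Set String) (q : List String) (d : List String) (hd : v = d ++ q) :
    pvVisA rg v q = d ++ pvPopA rg v q := by
  induction v, q using pvPopA.induct rg generalizing d with
  | case1 v => simpa [pvVisA, pvPopA] using hd
  | case2 v node rest ih =>
    obtain ⟨Δ, h1, _, _, _⟩ := pvFoldA_ex (rg.getD node []) v rest
    have e1 : (pvFoldStepA rg node v rest).1 = v ++ Δ := by unfold pvFoldStepA; rw [h1]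
    have e2 : (pvFoldStepA rg node v rest).2 = rest ++ Δ := by unfold pvFoldStepA; rw [h1]
    rw [pvVisA, pvPopA, ih (d := d ++ [node])]
    · simp
    · rw [e1, e2, hd]
      simp

theorem pvVisA_nodup (rg : PySem.Dict String (List String))
    (v : PySem.Set String) (q : List String) (hv : v.Nodup) :
    (pvVisA rg v q).Nodup := by
  induction v, q using pvVisA.induct rg with
  | case1 v => simpa [pvVisA] using hv
  | case2 v node rest ih =>
    obtain ⟨Δ, h1, h2, h3, _⟩ := pvFoldA_ex (rg.getD node []) v rest
    have e1 : (pvFoldStepA rg node v rest).1 = v ++ Δ := by unfold pvFoldStepA; rw [h1]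
    rw [pvVisA]
    refine ih ?_
    rw [e1]
    exact List.Nodup.append hv h2 (fun x hx hΔ => (h3 x hΔ).2 hx)

theorem pvVisA_mono (rg : PySem.Dict String (List String))
    (v : PySem.Set String) (q : List String) :
    ∃ Γ : List String, pvVisA rg v q = v ++ Γ := by
  induction v, q using pvVisA.induct rg with
  | case1 v => exact ⟨[], by simp [pvVisA]⟩
  | case2 v node rest ih =>
    obtain ⟨Δ, h1, _, _, _⟩ := pvFoldA_ex (rg.getD node []) v rest
    obtain ⟨Γ, hΓ⟩ := ih
    have e1 : (pvFoldStepA rg node v rest).1 = v ++ Δ := by unfold pvFoldStepA; rw [h1]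
    refine ⟨Δ ++ Γ, ?_⟩
    rw [pvVisA, hΓ, e1]
    simp

theorem pvVisA_sound (rg : PySem.Dict String (List String)) (P : String → Prop)
    (hcl : ∀ u w, P u → w ∈ rg.getD u [] → P w) (v : PySem.Set String) (q : List String)
    (hv : ∀ x ∈ v, P x) (hq : ∀ x ∈ q, x ∈ v) : ∀ x ∈ pvVisA rg v q, P x := by
  induction v, q using pvVisA.induct rg with
  | case1 v => simpa [pvVisA] using hv
  | case2 v node rest ih =>
    obtain ⟨Δ, h1, _, h3, _⟩ := pvFoldA_ex (rg.getD node []) v rest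
    have e1 : (pvFoldStepA rg node v rest).1 = v ++ Δ := by unfold pvFoldStepA; rw [h1]
    have e2 : (pvFoldStepA rg node v rest).2 = rest ++ Δ := by unfold pvFoldStepA; rw [h1]
    intro x hx
    rw [pvVisA] at hx
    refine ih ?_ ?_ x hx
    · rw [e1]
      intro y hy
      rcases List.mem_append.mp hy with hy | hy
      · exact hv y hy
      · exact hcl node y (hv node (hq node (by simp))) (h3 y hy).1
    · rw [e1, e2]
      intro y hy
      rcases List.mem_append.mp hy with hy | hy
      · exact List.mem_append.mpr (Or.inl (hq y (by simp [hy])))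
      · exact List.mem_append.mpr (Or.inr hy)

theorem pvVisA_closed (rg : PySem.Dict String (List String))
    (v : PySem.Set String) (q : List String)
    (hJ : ∀ u ∈ v, u ∉ q → ∀ w ∈ rg.getD u [], w ∈ v) :
    ∀ u ∈ pvVisA rg v q, ∀ w ∈ rg.getD u [], w ∈ pvVisA rg v q := by
  induction v, q using pvVisA.induct rg with
  | case1 v =>
    intro u hu w hw
    simp only [pvVisA] at hu ⊢
    exact hJ u hu (by simp) w hw
  | case2 v node rest ih =>
    obtain ⟨Δ, h1, _, h3, h4⟩ := pvFoldA_ex (rg.getD node []) v rest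
    have e1 : (pvFoldStepA rg node v rest).1 = v ++ Δ := by unfold pvFoldStepA; rw [h1]
    have e2 : (pvFoldStepA rg node v rest).2 = rest ++ Δ := by unfold pvFoldStepA; rw [h1]
    intro u hu w hw
    rw [pvVisA] at hu ⊢
    refine ih ?_ u hu w hw
    rw [e1, e2]
    intro y hy hyq w' hw'
    rcases List.mem_append.mp hy with hyv | hyΔ
    · by_cases hyc : y = node
      · subst hyc
        exact List.mem_append.mpr ((List.mem_append.mp (h4 w' hw')).imp id id)
      · have hynq : y ∉ (node :: rest) := by
          intro hmem
          rcases List.mem_cons.mp hmem with h | h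
          · exact hyc h
          · exact hyq (List.mem_append.mpr (Or.inl h))
        exact List.mem_append.mpr (Or.inl (hJ y hyv hynq w' hw'))
    · exact absurd (List.mem_append.mpr (Or.inr hyΔ)) hyq

theorem pvVisA_char (rg : PySem.Dict String (List String)) (t x : String) :
    x ∈ pvVisA rg (PySem.Set.ofList [t]) [t]
      ↔ Relation.ReflTransGen (fun u w => w ∈ rg.getD u []) t x := by
  have hof : PySem.Set.ofList [t] = [t] := rfl
  rw [hof]
  constructor
  · intro hx
    refine pvVisA_sound rg (Relation.ReflTransGen (fun u w => w ∈ rg.getD u []) t)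
      (fun u w hu he => hu.tail he) [t] [t] ?_ (fun y hy => hy) x hx
    intro y hy
    rcases List.mem_singleton.mp hy with rfl
    exact Relation.ReflTransGen.refl
  · intro hx
    induction hx with
    | refl =>
      obtain ⟨Γ, hΓ⟩ := pvVisA_mono rg [t] [t]
      rw [hΓ]
      simp
    | tail hut hvw ih =>
      exact pvVisA_closed rg [t] [t]
        (fun u hu hnq w hw => absurd (List.mem_singleton.mp hu ▸ List.mem_singleton.mpr rfl : u ∈ [t]) hnq)
        _ ih _ hvw

-- ----- pop sequence facts, value/key facts of the reachable-dict updates -----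
theorem pvPopA_eq_vis (rg : PySem.Dict String (List String)) (t : String) :
    pvPopA rg (PySem.Set.ofList [t]) [t] = pvVisA rg (PySem.Set.ofList [t]) [t] :=
  (pvVisA_pop rg (PySem.Set.ofList [t]) [t] [] rfl).symm

theorem pvPopA_nodup (rg : PySem.Dict String (List String)) (t : String) :
    (pvPopA rg (PySem.Set.ofList [t]) [t]).Nodup := by
  rw [pvPopA_eq_vis]
  exact pvVisA_nodup rg _ _ (by simp)

theorem pvPopA_sub_keys (devices : List (String × List String))
    (hnd : (devices.map (fun p => p.1)).Nodup) (t : String)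
    (hc : (PySem.Dict.mk devices).contains t = true) :
    ∀ x ∈ pvPopA (pvRevGraph devices) (PySem.Set.ofList [t]) [t],
      (PySem.Dict.mk devices).contains x = true := by
  rw [pvPopA_eq_vis]
  refine pvVisA_sound (pvRevGraph devices) (fun x => (PySem.Dict.mk devices).contains x = true)
    ?_ _ _ ?_ (fun y hy => hy)
  · intro u w _ hw
    have := (pvRG_mem devices hnd u w).mp hw
    exact (pvContains_mk_mem devices w).mpr (pvMem_getD_mk_keys devices w u this.1)
  · intro y hy
    rcases List.mem_singleton.mp hy with rfl
    exact hc

theorem pvModFold_getD_notmem (seq : List String) (t : String)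
    (r : PySem.Dict String (PySem.Set String)) (k : String) (hk : k ∉ seq) :
    (seq.foldl (fun r n => r.modify n [] (fun s => PySem.Set.add s t)) r).getD k []
      = r.getD k [] := by
  induction seq generalizing r with
  | nil => rfl
  | cons n rest ih =>
    rw [List.foldl_cons, ih _ (by simp_all), PySem.Dict.getD_modify]
    simp only [List.mem_cons] at hk
    rw [if_neg (fun h => hk (Or.inl h))]

theorem pvModFold_getD (seq : List String) (t : String)
    (r : PySem.Dict String (PySem.Set String)) (k : String) (hnd : seq.Nodup) :
    (seq.foldl (fun r n => r.modify n [] (fun s => PySem.Set.add s t)) r).getD k []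
      = if k ∈ seq then PySem.Set.add (r.getD k []) t else r.getD k [] := by
  induction seq generalizing r with
  | nil => simp
  | cons n rest ih =>
    rw [List.foldl_cons]
    by_cases hk : k = n
    · subst hk
      have hkr : k ∉ rest := by simp_all
      rw [pvModFold_getD_notmem rest t _ k hkr, PySem.Dict.getD_modify, if_pos rfl]
      simp
    · rw [ih _ (by simp_all), PySem.Dict.getD_modify, if_neg hk]
      simp only [List.mem_cons]
      by_cases hkrest : k ∈ rest <;> simp [hk, hkrest]

theorem pvSetUpdate_of_subset (seq : List String) (s : PySem.Set String)
    (hsub : ∀ x ∈ seq, x ∈ s) : PySem.Set.update s seq = s := by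
  induction seq generalizing s with
  | nil => rfl
  | cons n rest ih =>
    have hn : PySem.Set.add s n = s := by
      have hmem : n ∈ s := hsub n (List.mem_cons_self ..)
      have : s.contains n = true := by simp [PySem.Set.contains, hmem]
      simp [PySem.Set.add, hmem]
    have : PySem.Set.update s (n :: rest) = PySem.Set.update (PySem.Set.add s n) rest := rfl
    rw [this, hn, ih s (fun x hx => hsub x (by simp [hx]))]

theorem pvModFold_keys (seq : List String) (t : String)
    (r : PySem.Dict String (PySem.Set String)) (hsub : ∀ x ∈ seq, x ∈ r.keys) :
    (seq.foldl (fun r n => r.modify n [] (fun s => PySem.Set.add s t)) r).keys = r.keys := by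
  have := PySem.Dict.keys_foldl_modify seq ([] : PySem.Set String)
    (fun _ _ => fun s => PySem.Set.add s t) r
  rw [this, pvSetUpdate_of_subset seq r.keys hsub]

theorem pvAdd_notmem (s : PySem.Set String) (x : String) (hx : x ∉ s) :
    PySem.Set.add s x = s ++ [x] := by
  simp [PySem.Set.add, PySem.Set.contains, hx]

theorem pvTargetsFold (devices : List (String × List String))
    (hnd : (devices.map (fun p => p.1)).Nodup)
    (ts : List String) (hts : ts.Nodup) (r : PySem.Dict String (PySem.Set String))
    (hkeys : r.keys = devices.map (fun p => p.1))
    (hfresh : ∀ k t', t' ∈ ts → t' ∉ r.getD k []) :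
    (∀ k, (ts.foldl (fun reachable target =>
        if (pvRevGraph devices).contains target then
          pvBfsA (pvRevGraph devices) target (PySem.Set.ofList [target]) [target] reachable
        else reachable) r).getD k []
      = r.getD k [] ++ ts.filter (fun t => (pvRevGraph devices).contains t
          && decide (k ∈ pvPopA (pvRevGraph devices) (PySem.Set.ofList [t]) [t])))
    ∧ (ts.foldl (fun reachable target =>
        if (pvRevGraph devices).contains target then
          pvBfsA (pvRevGraph devices) target (PySem.Set.ofList [target]) [target] reachable
        else reachable) r).keys = devices.map (fun p => p.1) := by
  induction ts generalizing r with
  | nil => exact ⟨fun k => by simp, by simpa using hkeys⟩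
  | cons t rest ih =>
    rw [List.foldl_cons]
    by_cases hct : (pvRevGraph devices).contains t = true
    · rw [if_pos hct, pvBfsA_decomp]
      have hnodup := pvPopA_nodup (pvRevGraph devices) t
      have hsubpop : ∀ x ∈ pvPopA (pvRevGraph devices) (PySem.Set.ofList [t]) [t],
          x ∈ r.keys := by
        intro x hx
        rw [hkeys]
        have hc := pvPopA_sub_keys devices hnd t (by rwa [pvRG_contains] at hct) x hx
        exact (pvContains_mk_mem devices x).mp hc
      have hkeys' := pvModFold_keys _ t r hsubpop
      have hgetD' : ∀ k,
          ((pvPopA (pvRevGraph devices) (PySem.Set.ofList [t]) [t]).foldl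
            (fun r n => r.modify n [] (fun s => PySem.Set.add s t)) r).getD k []
          = if k ∈ pvPopA (pvRevGraph devices) (PySem.Set.ofList [t]) [t] then
              r.getD k [] ++ [t] else r.getD k [] := by
        intro k
        rw [pvModFold_getD _ t r k hnodup]
        by_cases hk : k ∈ pvPopA (pvRevGraph devices) (PySem.Set.ofList [t]) [t]
        · rw [if_pos hk, if_pos hk, pvAdd_notmem _ t (hfresh k t (by simp))]
        · rw [if_neg hk, if_neg hk]
      obtain ⟨ihg, ihk⟩ := ih (List.Nodup.of_cons hts) _ (by rw [hkeys']; exact hkeys) (by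
        intro k t' ht'
        rw [hgetD' k]
        have hne : t' ≠ t := by rintro rfl; simp_all
        by_cases hk : k ∈ pvPopA (pvRevGraph devices) (PySem.Set.ofList [t]) [t]
        · rw [if_pos hk]
          simp only [List.mem_append, List.mem_singleton]
          rintro (h | h)
          · exact hfresh k t' (by simp [ht']) h
          · exact hne h
        · rw [if_neg hk]
          exact hfresh k t' (by simp [ht']))
      refine ⟨fun k => ?_, ihk⟩
      rw [ihg k, hgetD' k, List.filter_cons]
      by_cases hk : k ∈ pvPopA (pvRevGraph devices) (PySem.Set.ofList [t]) [t]
      · rw [if_pos hk]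
        simp [hct, hk]
      · rw [if_neg hk]
        simp [hct, hk]
    · rw [if_neg hct]
      obtain ⟨ihg, ihk⟩ := ih (List.Nodup.of_cons hts) r hkeys (fun k t' ht' => hfresh k t' (by simp [ht']))
      refine ⟨fun k => ?_, ihk⟩
      rw [ihg k, List.filter_cons]
      have : ((pvRevGraph devices).contains t
          && decide (k ∈ pvPopA (pvRevGraph devices) (PySem.Set.ofList [t]) [t])) = false := by
        simp only [Bool.and_eq_false_iff]
        left
        simpa using hct
      rw [this]
      simp

-- ----- B's saturation: chains, step preservation, fixpoint characterization -----
def pvChain (dev : PySem.Dict String (List String)) : String → List String → String → Prop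
  | a, [], b => a = b
  | a, c :: cs, b => pvE dev a c ∧ pvChain dev c cs b

theorem pvChain_snoc (dev : PySem.Dict String (List String)) (a : String) (l : List String)
    (b c : String) (h : pvChain dev a l b) (he : pvE dev b c) :
    pvChain dev a (l ++ [c]) c := by
  induction l generalizing a with
  | nil => rcases h with rfl; exact ⟨he, rfl⟩
  | cons d ds ih => exact ⟨h.1, ih d h.2⟩

theorem pvChain_iff_rtg (dev : PySem.Dict String (List String)) (a b : String) :
    (∃ l, pvChain dev a l b) ↔ Relation.ReflTransGen (pvE dev) a b := by
  constructor
  · rintro ⟨l, hl⟩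
    induction l generalizing a with
    | nil => rcases hl with rfl; exact Relation.ReflTransGen.refl
    | cons c cs ih => exact Relation.ReflTransGen.head hl.1 (ih c hl.2)
  · intro h
    induction h with
    | refl => exact ⟨[], rfl⟩
    | tail _ he ih => obtain ⟨l, hl⟩ := ih; exact ⟨l ++ [_], pvChain_snoc dev _ l _ _ hl he⟩

theorem pvChain_drop (dev : PySem.Dict String (List String)) (l1 : List String) (a x b : String)
    (l2 : List String) (h : pvChain dev a (l1 ++ x :: l2) b) : pvChain dev x l2 b := by
  induction l1 generalizing a with
  | nil => exact h.2
  | cons c cs ih => exact ih c h.2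

theorem pvChain_shorten (dev : PySem.Dict String (List String)) :
    ∀ (n : Nat) (l : List String), l.length ≤ n → ∀ a b, pvChain dev a l b →
      ∃ l', pvChain dev a l' b ∧ (a :: l').Nodup ∧ l' ⊆ l := by
  intro n
  induction n with
  | zero =>
    intro l hl a b h
    rw [List.length_eq_zero_iff.mp (Nat.le_zero.mp hl)] at h ⊢
    rcases h with rfl
    exact ⟨[], rfl, by simp, by simp⟩
  | succ m ih =>
    intro l hl a b h
    by_cases ha : a ∈ l
    · obtain ⟨l1, l2, rfl⟩ := List.append_of_mem ha
      have h2 := pvChain_drop dev l1 a a b l2 h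
      have hlen : l2.length ≤ m := by
        have := hl
        simp only [List.length_append, List.length_cons] at this
        omega
      obtain ⟨l', h1', h2', h3'⟩ := ih l2 hlen a b h2
      exact ⟨l', h1', h2', fun x hx => by simp [h3' hx]⟩
    · cases l with
      | nil => rcases h with rfl; exact ⟨[], rfl, by simp, by simp⟩
      | cons c cs =>
        obtain ⟨he, hch⟩ := h
        obtain ⟨l', h1', h2', h3'⟩ := ih cs (by simpa using hl) c b hch
        refine ⟨c :: l', ⟨he, h1'⟩, ?_, ?_⟩
        · have hac : a ∉ c :: l' := by
            intro hm
            rcases List.mem_cons.mp hm with rfl | hm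
            · exact ha (by simp)
            · exact ha (by simp [h3' hm])
          exact List.nodup_cons.mpr ⟨hac, h2'⟩
        · intro x hx
          rcases List.mem_cons.mp hx with rfl | hx
          · simp
          · simp [h3' hx]

theorem pvChain_mem_keys (dev : PySem.Dict String (List String)) (a : String) (l : List String)
    (b : String) (h : pvChain dev a l b) : ∀ x ∈ l, dev.contains x = true := by
  induction l generalizing a with
  | nil => simp
  | cons c cs ih =>
    intro x hx
    rcases List.mem_cons.mp hx with rfl | hx
    · exact h.1.2
    · exact ih c h.2 x hx

-- one elementary saturation step of B ('if nb in reach and not reach[nb] <= reach[n]: …')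
def pvStepB (n : String) (st : PySem.Dict String (PySem.Set String) × Bool) (nb : String) :
    PySem.Dict String (PySem.Set String) × Bool :=
  if st.1.contains nb && !(PySem.Set.issubset (st.1.getD nb []) (st.1.getD n [])) then
    (st.1.modify n [] (fun s => PySem.Set.update s (st.1.getD nb [])), true)
  else st

theorem pvFoldNb_cons (n nb : String) (tl : List String)
    (st : PySem.Dict String (PySem.Set String) × Bool) :
    pvFoldNb n (nb :: tl) st = pvFoldNb n tl (pvStepB n st nb) := rfl

theorem pvStepB_keys (n nb : String) (st : PySem.Dict String (PySem.Set String) × Bool)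
    (hn : n ∈ st.1.keys) : (pvStepB n st nb).1.keys = st.1.keys := by
  unfold pvStepB
  split_ifs with hg
  · simp only
    rw [PySem.Dict.keys_modify, PySem.Dict.keys_insert_of_contains st.1 _
      ((PySem.Dict.contains_iff_mem_keys st.1 n).mpr hn)]
  · rfl

theorem pvStepB_mono (n nb : String) (st : PySem.Dict String (PySem.Set String) × Bool)
    (k x : String) (hx : x ∈ st.1.getD k []) : x ∈ (pvStepB n st nb).1.getD k [] := by
  unfold pvStepB
  split_ifs with hg
  · simp only
    rw [PySem.Dict.getD_modify]
    split_ifs with hk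
    · subst hk
      exact (PySem.Set.mem_update _ _ x).mpr (Or.inl hx)
    · exact hx
  · exact hx

theorem pvStepB_flag (n nb : String) (st : PySem.Dict String (PySem.Set String) × Bool)
    (h : st.2 = true) : (pvStepB n st nb).2 = true := by
  unfold pvStepB
  split_ifs
  · rfl
  · exact h

theorem pvFoldNb_flag (n : String) (L : List String)
    (st : PySem.Dict String (PySem.Set String) × Bool) (h : st.2 = true) :
    (pvFoldNb n L st).2 = true := by
  induction L generalizing st with
  | nil => exact h
  | cons nb tl ih => rw [pvFoldNb_cons]; exact ih _ (pvStepB_flag n nb st h)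

-- the inner fold of B preserves the keys, only grows the sets, and stays sound
theorem pvFoldNb_pres (dev : PySem.Dict String (List String)) (n : String) (L : List String)
    (st : PySem.Dict String (PySem.Set String) × Bool) (hn : n ∈ st.1.keys)
    (hkeys : st.1.keys = dev.keys) (hL : ∀ y ∈ L, y ∈ dev.getD n []) :
    (pvFoldNb n L st).1.keys = st.1.keys
    ∧ (∀ k x, x ∈ st.1.getD k [] → x ∈ (pvFoldNb n L st).1.getD k [])
    ∧ ((∀ k x, x ∈ st.1.getD k [] → Relation.ReflTransGen (pvE dev) k x)
       → ∀ k x, x ∈ (pvFoldNb n L st).1.getD k [] → Relation.ReflTransGen (pvE dev) k x) := by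
  induction L generalizing st with
  | nil => exact ⟨rfl, fun k x hx => hx, fun h => h⟩
  | cons nb tl ih =>
    have hstepk := pvStepB_keys n nb st hn
    have hstepm := pvStepB_mono n nb st
    have hn' : n ∈ (pvStepB n st nb).1.keys := by rw [hstepk]; exact hn
    have hkeys' : (pvStepB n st nb).1.keys = dev.keys := by rw [hstepk]; exact hkeys
    obtain ⟨ik, im, is⟩ := ih (pvStepB n st nb) hn' hkeys' (fun y hy => hL y (by simp [hy]))
    rw [pvFoldNb_cons]
    refine ⟨by rw [ik, hstepk], fun k x hx => im k x (hstepm k x hx), ?_⟩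
    intro hs k x hx
    refine is ?_ k x hx
    -- soundness of the single step
    intro k' x' hx'
    unfold pvStepB at hx'
    by_cases hg : (st.1.contains nb
        && !(PySem.Set.issubset (st.1.getD nb []) (st.1.getD n []))) = true
    · rw [if_pos hg] at hx'
      simp only at hx'
      rw [PySem.Dict.getD_modify] at hx'
      by_cases hk' : k' = n
      · rw [if_pos hk'] at hx'
        subst hk'
        rcases (PySem.Set.mem_update _ _ x').mp hx' with h | h
        · exact hs k' x' h
        · refine Relation.ReflTransGen.head ?_ (hs nb x' h)
          refine ⟨hL nb (by simp), ?_⟩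
          have hcnb : st.1.contains nb = true := (Bool.and_eq_true _ _).mp hg |>.1
          rw [PySem.Dict.contains_iff_mem_keys] at hcnb ⊢
          rw [← hkeys]
          exact hcnb
      · rw [if_neg hk'] at hx'
        exact hs k' x' hx'
    · rw [if_neg hg] at hx'
      exact hs k' x' hx'

-- when the inner fold reports no change, nothing changed and every scanned edge was saturated
theorem pvFoldNb_nochange (n : String) (L : List String)
    (st : PySem.Dict String (PySem.Set String) × Bool)
    (h : (pvFoldNb n L st).2 = false) :
    (pvFoldNb n L st).1 = st.1 ∧ st.2 = false ∧
    ∀ nb ∈ L, st.1.contains nb = true →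
      PySem.Set.issubset (st.1.getD nb []) (st.1.getD n []) = true := by
  induction L generalizing st with
  | nil => exact ⟨rfl, h, by simp⟩
  | cons nb tl ih =>
    rw [pvFoldNb_cons] at h ⊢
    by_cases hg : (st.1.contains nb
        && !(PySem.Set.issubset (st.1.getD nb []) (st.1.getD n []))) = true
    · exfalso
      have : (pvStepB n st nb).2 = true := by unfold pvStepB; rw [if_pos hg]
      rw [pvFoldNb_flag n tl _ this] at h
      cases h
    · have hst : pvStepB n st nb = st := by unfold pvStepB; rw [if_neg hg]
      rw [hst] at h ⊢
      obtain ⟨e, hf, hp⟩ := ih st h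
      refine ⟨e, hf, ?_⟩
      intro y hy hcy
      rcases List.mem_cons.mp hy with rfl | hy
      · rcases Bool.and_eq_false_iff.mp (Bool.eq_false_iff.mpr hg |>.symm ▸ rfl : (st.1.contains y && !(PySem.Set.issubset (st.1.getD y []) (st.1.getD n []))) = false) with h' | h'
        · rw [hcy] at h'; cases h'
        · simpa using h'
      · exact hp y hy hcy

-- completeness of the inner fold along one edge n → c
theorem pvFoldNb_edge (dev : PySem.Dict String (List String)) (n : String) (L : List String)
    (st : PySem.Dict String (PySem.Set String) × Bool) (c x : String)
    (hn : n ∈ st.1.keys) (hkeys : st.1.keys = dev.keys) (hL : ∀ y ∈ L, y ∈ dev.getD n [])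
    (hc : c ∈ L) (hcd : dev.contains c = true) (hx : x ∈ st.1.getD c []) :
    x ∈ (pvFoldNb n L st).1.getD n [] := by
  induction L generalizing st with
  | nil => cases hc
  | cons nb tl ih =>
    have hstepk := pvStepB_keys n nb st hn
    have hn' : n ∈ (pvStepB n st nb).1.keys := by rw [hstepk]; exact hn
    have hkeys' : (pvStepB n st nb).1.keys = dev.keys := by rw [hstepk]; exact hkeys
    rw [pvFoldNb_cons]
    by_cases hnbc : nb = c
    · subst hnbc
      have hcont : st.1.contains nb = true := by
        rw [PySem.Dict.contains_iff_mem_keys, hkeys]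
        exact (PySem.Dict.contains_iff_mem_keys dev nb).mp hcd
      by_cases hsub : PySem.Set.issubset (st.1.getD nb []) (st.1.getD n []) = true
      · have hst : pvStepB n st nb = st := by
          unfold pvStepB
          rw [if_neg (by simp [hcont, hsub])]
        rw [hst]
        have hxn : x ∈ st.1.getD n [] := (PySem.Set.issubset_iff _ _).mp hsub x hx
        exact (pvFoldNb_pres dev n tl st hn hkeys
          (fun y hy => hL y (by simp [hy]))).2.1 n x hxn
      · have hxn : x ∈ (pvStepB n st nb).1.getD n [] := by
          unfold pvStepB
          rw [if_pos (by simp [hcont, hsub])]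
          simp only
          rw [PySem.Dict.getD_modify, if_pos rfl]
          exact (PySem.Set.mem_update _ _ x).mpr (Or.inr hx)
        exact (pvFoldNb_pres dev n tl _ hn' hkeys'
          (fun y hy => hL y (by simp [hy]))).2.1 n x hxn
    · have hc' : c ∈ tl := by
        rcases List.mem_cons.mp hc with h | h
        · exact absurd h.symm hnbc
        · exact h
      exact ih _ hn' hkeys' (fun y hy => hL y (by simp [hy])) hc' (pvStepB_mono n nb st c x hx)

-- the per-sweep fold over the device nodes
theorem pvSweepB_pres (dev : PySem.Dict String (List String))
    (ps : List (String × List String)) (st : PySem.Dict String (PySem.Set String) × Bool)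
    (hps : ∀ p ∈ ps, p.1 ∈ dev.keys) (hkeys : st.1.keys = dev.keys) :
    (ps.foldl (fun st p => pvFoldNb p.1 (dev.getD p.1 []) st) st).1.keys = dev.keys
    ∧ (∀ k x, x ∈ st.1.getD k [] →
        x ∈ (ps.foldl (fun st p => pvFoldNb p.1 (dev.getD p.1 []) st) st).1.getD k [])
    ∧ ((∀ k x, x ∈ st.1.getD k [] → Relation.ReflTransGen (pvE dev) k x)
       → ∀ k x, x ∈ (ps.foldl (fun st p => pvFoldNb p.1 (dev.getD p.1 []) st) st).1.getD k []
       → Relation.ReflTransGen (pvE dev) k x) := by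
  induction ps generalizing st with
  | nil => exact ⟨hkeys, fun k x hx => hx, fun h => h⟩
  | cons p tl ih =>
    have hn : p.1 ∈ st.1.keys := by rw [hkeys]; exact hps p (by simp)
    obtain ⟨sk, sm, ss⟩ := pvFoldNb_pres dev p.1 (dev.getD p.1 []) st hn hkeys (fun y hy => hy)
    have hkeys' : (pvFoldNb p.1 (dev.getD p.1 []) st).1.keys = dev.keys := by
      rw [sk]; exact hkeys
    obtain ⟨ik, im, is⟩ := ih _ (fun q hq => hps q (by simp [hq])) hkeys'
    rw [List.foldl_cons]
    exact ⟨ik, fun k x hx => im k x (sm k x hx), fun h => is (ss h)⟩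

-- when a whole sweep reports no change, the state is a fixpoint: every edge is saturated
theorem pvSweepB_nochange (dev : PySem.Dict String (List String))
    (ps : List (String × List String)) (st : PySem.Dict String (PySem.Set String) × Bool)
    (hps : ∀ p ∈ ps, p.1 ∈ dev.keys) (hkeys : st.1.keys = dev.keys)
    (h : (ps.foldl (fun st p => pvFoldNb p.1 (dev.getD p.1 []) st) st).2 = false) :
    (ps.foldl (fun st p => pvFoldNb p.1 (dev.getD p.1 []) st) st).1 = st.1 ∧ st.2 = false ∧
    ∀ p ∈ ps, ∀ nb ∈ dev.getD p.1 [], st.1.contains nb = true →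
      PySem.Set.issubset (st.1.getD nb []) (st.1.getD p.1 []) = true := by
  induction ps generalizing st with
  | nil => exact ⟨rfl, h, by simp⟩
  | cons p tl ih =>
    rw [List.foldl_cons] at h ⊢
    have hn : p.1 ∈ st.1.keys := by rw [hkeys]; exact hps p (by simp)
    obtain ⟨sk, _, _⟩ := pvFoldNb_pres dev p.1 (dev.getD p.1 []) st hn hkeys (fun y hy => hy)
    have hkeys' : (pvFoldNb p.1 (dev.getD p.1 []) st).1.keys = dev.keys := by
      rw [sk]; exact hkeys
    obtain ⟨e, hf, hp⟩ := ih _ (fun q hq => hps q (by simp [hq])) hkeys' h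
    obtain ⟨e0, hf0, hp0⟩ := pvFoldNb_nochange p.1 (dev.getD p.1 []) st hf
    rw [e0] at e hp
    refine ⟨e, hf0, ?_⟩
    intro q hq nb hnb hcnb
    rcases List.mem_cons.mp hq with rfl | hq
    · exact hp0 nb hnb hcnb
    · exact hp q hq nb hnb hcnb

-- completeness of one sweep: chains one step longer are swallowed
def pvComplete (dev : PySem.Dict String (List String)) (m : Nat)
    (R : PySem.Dict String (PySem.Set String)) : Prop :=
  ∀ k, dev.contains k = true → ∀ l x, pvChain dev k l x → l.length ≤ m → x ∈ R.getD k []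

theorem pvSweepB_complete (dev : PySem.Dict String (List String)) (m : Nat)
    (ps : List (String × List String)) (st : PySem.Dict String (PySem.Set String) × Bool)
    (hps : ∀ p ∈ ps, p.1 ∈ dev.keys) (hkeys : st.1.keys = dev.keys)
    (hcomp : pvComplete dev m st.1) :
    ∀ k, k ∈ ps.map (fun p => p.1) → dev.contains k = true →
      ∀ l x, pvChain dev k l x → l.length ≤ m + 1 →
        x ∈ (ps.foldl (fun st p => pvFoldNb p.1 (dev.getD p.1 []) st) st).1.getD k [] := by
  induction ps generalizing st with
  | nil => simp
  | cons p tl ih =>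
    intro k hk hkd l x hch hlen
    have hn : p.1 ∈ st.1.keys := by rw [hkeys]; exact hps p (by simp)
    obtain ⟨sk, sm, _⟩ := pvFoldNb_pres dev p.1 (dev.getD p.1 []) st hn hkeys (fun y hy => hy)
    have hkeys' : (pvFoldNb p.1 (dev.getD p.1 []) st).1.keys = dev.keys := by
      rw [sk]; exact hkeys
    rw [List.foldl_cons]
    by_cases hkp : k = p.1
    · subst hkp
      have hxin : x ∈ (pvFoldNb p.1 (dev.getD p.1 []) st).1.getD p.1 [] := by
        cases l with
        | nil =>
          rcases hch with rfl
          exact sm p.1 p.1 (hcomp p.1 hkd [] p.1 rfl (by simp))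
        | cons c cs =>
          obtain ⟨⟨hce, hcd⟩, hch'⟩ := hch
          have hxc : x ∈ st.1.getD c [] :=
            hcomp c hcd cs x hch' (by simpa using Nat.le_of_succ_le_succ hlen)
          exact pvFoldNb_edge dev p.1 (dev.getD p.1 []) st c x hn hkeys
            (fun y hy => hy) hce hcd hxc
      exact (pvSweepB_pres dev tl _ (fun q hq => hps q (by simp [hq])) hkeys').2.1 p.1 x hxin
    · have hk' : k ∈ tl.map (fun p => p.1) := by
        rcases List.mem_map.mp hk with ⟨q, hq, rfl⟩
        rcases List.mem_cons.mp hq with rfl | hq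
        · exact absurd rfl hkp
        · exact List.mem_map.mpr ⟨q, hq, rfl⟩
      refine ih _ (fun q hq => hps q (by simp [hq])) hkeys' ?_ k hk' hkd l x hch hlen
      intro k' hk'd l' x' hch' hlen'
      exact sm k' x' (hcomp k' hk'd l' x' hch' hlen')

-- a state closed under every edge and containing each node contains everything reachable
theorem pvClosed_complete (dev : PySem.Dict String (List String))
    (R : PySem.Dict String (PySem.Set String))
    (hrefl : ∀ k, dev.contains k = true → k ∈ R.getD k [])
    (hcl : ∀ k, dev.contains k = true → ∀ c, pvE dev k c →
      ∀ x ∈ R.getD c [], x ∈ R.getD k []) :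
    ∀ k x, dev.contains k = true → Relation.ReflTransGen (pvE dev) k x → x ∈ R.getD k [] := by
  intro k x hk h
  revert hk
  induction h using Relation.ReflTransGen.head_induction_on with
  | refl => exact fun hx => hrefl x hx
  | head hab _ ihb => exact fun hka => hcl _ hka _ hab x (ihb hab.2)

-- the seed dict {n: {n} for n in devices}
theorem pvSeedB_getD (devices : List (String × List String))
    (hnd : (devices.map (fun p => p.1)).Nodup) (k : String) :
    (devices.foldl (fun d p => d.insert p.1 (PySem.Set.ofList [p.1])) PySem.Dict.empty).getD k []
      = if k ∈ devices.map (fun p => p.1) then [k] else [] := by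
  have hitems := PySem.Dict.items_foldl_insert_fresh devices (fun p => p.1)
    (fun p => PySem.Set.ofList [p.1]) PySem.Dict.empty
    (fun a _ => PySem.Dict.contains_empty _) hnd
  have hkeys : (devices.foldl (fun d p => d.insert p.1 (PySem.Set.ofList [p.1]))
      PySem.Dict.empty).keys = devices.map (fun p => p.1) := by
    simp only [PySem.Dict.keys, hitems]
    simp [List.map_map]
    rfl
  by_cases hk : k ∈ devices.map (fun p => p.1)
  · rw [if_pos hk]
    rcases List.mem_map.mp hk with ⟨p, hp, rfl⟩
    have hmem : (p.1, PySem.Set.ofList [p.1]) ∈ (devices.foldl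
        (fun d p => d.insert p.1 (PySem.Set.ofList [p.1])) PySem.Dict.empty).items := by
      rw [hitems]
      exact List.mem_append_right _ (List.mem_map.mpr ⟨p, hp, rfl⟩)
    rw [PySem.Dict.getD_of_mem_items _ hmem (by rw [hkeys]; exact hnd) []]
    rfl
  · rw [if_neg hk]
    refine PySem.Dict.getD_of_not_contains _ _ ?_
    rw [← Bool.not_eq_true, PySem.Dict.contains_iff_mem_keys, hkeys]
    exact hk

theorem pvSeedB_keys (devices : List (String × List String))
    (hnd : (devices.map (fun p => p.1)).Nodup) :
    (devices.foldl (fun d p => d.insert p.1 (PySem.Set.ofList [p.1])) PySem.Dict.empty).keys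
      = devices.map (fun p => p.1) := by
  have hitems := PySem.Dict.items_foldl_insert_fresh devices (fun p => p.1)
    (fun p => PySem.Set.ofList [p.1]) PySem.Dict.empty
    (fun a _ => PySem.Dict.contains_empty _) hnd
  simp only [PySem.Dict.keys, hitems]
  simp [List.map_map]
  rfl

-- the state of B's saturation loop (outer 'for _ in range(len(devices))' with break)
def pvIterB (devices : List (String × List String)) (m : Nat) :
    PySem.Dict String (PySem.Set String) × Bool :=
  (List.range m).foldl
    (fun st _ => if st.2 then st
      else
        let sw := devices.foldl
          (fun st p => pvFoldNb p.1 ((PySem.Dict.mk devices).getD p.1 []) st) (st.1, false)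
        (sw.1, !sw.2))
    (devices.foldl (fun d p => d.insert p.1 (PySem.Set.ofList [p.1])) PySem.Dict.empty, false)

-- B's final saturated dict, as the port computes it (definitional)
def pvReachB (devices : List (String × List String)) : PySem.Dict String (PySem.Set String) :=
  (pvIterB devices devices.length).1

theorem pvAltB_eq (devices : List (String × List String)) (targets : List String) :
    precompute_reachable_targets_alt devices targets
      = (devices.foldl (fun res p =>
          res.insert p.1 (PySem.Set.ofList
            ((targets.filter (fun t => (pvReachB devices).contains t)).filter
              (fun t => ((pvReachB devices).getD p.1 []).contains t))))
        PySem.Dict.empty).items := rfl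


theorem pvIterB_props (devices : List (String × List String))
    (hnd : (devices.map (fun p => p.1)).Nodup) (m : Nat) :
    (pvIterB devices m).1.keys = (PySem.Dict.mk devices).keys
    ∧ (∀ k x, x ∈ (pvIterB devices m).1.getD k []
        → Relation.ReflTransGen (pvE (PySem.Dict.mk devices)) k x)
    ∧ ((pvIterB devices m).2 = false → pvComplete (PySem.Dict.mk devices) m (pvIterB devices m).1)
    ∧ ((pvIterB devices m).2 = true → ∀ k x, (PySem.Dict.mk devices).contains k = true →
        Relation.ReflTransGen (pvE (PySem.Dict.mk devices)) k x
        → x ∈ (pvIterB devices m).1.getD k []) := by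
  have hdevkeys : (PySem.Dict.mk devices).keys = devices.map (fun p => p.1) := by
    simp [PySem.Dict.keys]
  have hps : ∀ p ∈ devices, p.1 ∈ (PySem.Dict.mk devices).keys := by
    intro p hp
    rw [hdevkeys]
    exact List.mem_map.mpr ⟨p, hp, rfl⟩
  induction m with
  | zero =>
    refine ⟨by rw [pvIterB, List.range_zero, List.foldl_nil, pvSeedB_keys devices hnd, hdevkeys],
      ?_, ?_, ?_⟩
    · intro k x hx
      rw [pvIterB, List.range_zero, List.foldl_nil] at hx
      rw [pvSeedB_getD devices hnd k] at hx
      split_ifs at hx with hk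
      · rcases List.mem_singleton.mp hx with rfl
        exact Relation.ReflTransGen.refl
      · cases hx
    · intro _ k hk l x hch hlen
      rw [List.length_eq_zero_iff.mp (Nat.le_zero.mp hlen)] at hch
      rcases hch with rfl
      rw [pvIterB, List.range_zero, List.foldl_nil,
        pvSeedB_getD devices hnd k, if_pos ((pvContains_mk_mem devices k).mp hk)]
      simp
    · intro hflag
      rw [pvIterB, List.range_zero, List.foldl_nil] at hflag
      cases hflag
  | succ m ihm =>
    obtain ⟨ik, is, ic, id⟩ := ihm
    have hstep : pvIterB devices (m + 1)
        = (if (pvIterB devices m).2 then pvIterB devices m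
          else
            let sw := devices.foldl
              (fun st p => pvFoldNb p.1 ((PySem.Dict.mk devices).getD p.1 []) st)
              ((pvIterB devices m).1, false)
            (sw.1, !sw.2)) := by
      rw [pvIterB, pvIterB, List.range_succ, List.foldl_append, List.foldl_cons, List.foldl_nil]
    by_cases hdone : (pvIterB devices m).2 = true
    · rw [hstep, if_pos hdone]
      exact ⟨ik, is, fun hf => absurd hdone (by rw [hf]; simp), fun _ => id hdone⟩
    · have hdone' : (pvIterB devices m).2 = false := Bool.eq_false_iff.mpr hdone
      have hsucc : pvIterB devices (m + 1)
          = ((devices.foldl (fun st p => pvFoldNb p.1 ((PySem.Dict.mk devices).getD p.1 []) st)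
              ((pvIterB devices m).1, false)).1,
             !(devices.foldl (fun st p => pvFoldNb p.1 ((PySem.Dict.mk devices).getD p.1 []) st)
              ((pvIterB devices m).1, false)).2) := by
        rw [hstep, if_neg hdone]
      rw [hsucc]
      set st0 : PySem.Dict String (PySem.Set String) × Bool := ((pvIterB devices m).1, false)
        with hst0
      have hkeys0 : st0.1.keys = (PySem.Dict.mk devices).keys := ik
      obtain ⟨sk, sm, ss⟩ := pvSweepB_pres (PySem.Dict.mk devices) devices st0 hps hkeys0
      have hcomp0 : pvComplete (PySem.Dict.mk devices) m st0.1 := ic hdone'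
      refine ⟨sk, ss (fun k x hx => is k x hx), ?_, ?_⟩
      · intro _ k hk l x hch hlen
        rcases Nat.lt_or_ge l.length (m + 1) with hlt | hge
        · exact sm k x (hcomp0 k hk l x hch (by omega))
        · have hkmem : k ∈ devices.map (fun p => p.1) := (pvContains_mk_mem devices k).mp hk
          exact pvSweepB_complete (PySem.Dict.mk devices) m devices st0 hps hkeys0 hcomp0
            k hkmem hk l x hch hlen
      · intro hflag
        -- the sweep reported no change: the state is a fixpoint
        have hswf : (devices.foldl
            (fun st p => pvFoldNb p.1 ((PySem.Dict.mk devices).getD p.1 []) st) st0).2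
            = false := by simpa using hflag
        obtain ⟨e, _, hp⟩ := pvSweepB_nochange (PySem.Dict.mk devices) devices st0 hps hkeys0 hswf
        rw [e]
        have hrefl : ∀ k, (PySem.Dict.mk devices).contains k = true → k ∈ st0.1.getD k [] :=
          fun k hk => hcomp0 k hk [] k rfl (by simp)
        have hcl : ∀ k, (PySem.Dict.mk devices).contains k = true →
            ∀ c, pvE (PySem.Dict.mk devices) k c → ∀ x ∈ st0.1.getD c [], x ∈ st0.1.getD k [] := by
          intro k hk c hkc x hx
          have hkmem : k ∈ devices.map (fun p => p.1) := (pvContains_mk_mem devices k).mp hk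
          rcases List.mem_map.mp hkmem with ⟨p, hpmem, hpk⟩
          have hcC : st0.1.contains c = true := by
            rw [PySem.Dict.contains_iff_mem_keys, hkeys0]
            exact (PySem.Dict.contains_iff_mem_keys _ _).mp hkc.2
          have hsub := hp p hpmem c (by rw [hpk]; exact hkc.1) hcC
          rw [hpk] at hsub
          exact (PySem.Set.issubset_iff _ _).mp hsub x hx
        exact fun k x hk hr => pvClosed_complete (PySem.Dict.mk devices) st0.1 hrefl hcl k x hk hr

-- final characterization of B's saturated sets
theorem pvReachB_char (devices : List (String × List String))
    (hnd : (devices.map (fun p => p.1)).Nodup) (k : String)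
    (hk : k ∈ devices.map (fun p => p.1)) (x : String) :
    (x ∈ (pvReachB devices).getD k []
      ↔ Relation.ReflTransGen (pvE (PySem.Dict.mk devices)) k x) := by
  obtain ⟨ik, is, ic, id⟩ := pvIterB_props devices hnd devices.length
  have hkd : (PySem.Dict.mk devices).contains k = true := (pvContains_mk_mem devices k).mpr hk
  constructor
  · exact is k x
  · intro h
    rcases hflag : (pvIterB devices devices.length).2 with _ | _
    · -- the loop ran all len(devices) sweeps: bound the chain by a nodup chain
      obtain ⟨l, hl⟩ := (pvChain_iff_rtg (PySem.Dict.mk devices) k x).mpr h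
      obtain ⟨l', h1', h2', _⟩ := pvChain_shorten (PySem.Dict.mk devices) l.length l le_rfl k x hl
      have hsub : (k :: l') ⊆ (PySem.Dict.mk devices).keys := by
        intro y hy
        rcases List.mem_cons.mp hy with rfl | hy
        · exact (PySem.Dict.contains_iff_mem_keys _ _).mp hkd
        · exact (PySem.Dict.contains_iff_mem_keys _ _).mp
            (pvChain_mem_keys (PySem.Dict.mk devices) k l' x h1' y hy)
      have hlen : l'.length + 1 ≤ devices.length := by
        have hnd' : (PySem.Dict.mk devices).keys.Nodup := by
          simp only [PySem.Dict.keys]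
          simpa [PySem.Dict.items] using hnd
        have := List.Subperm.length_le (List.subperm_of_subset h2' hsub)
        have hkl : (PySem.Dict.mk devices).keys.length = devices.length := by
          simp [PySem.Dict.keys]
        simp only [List.length_cons] at this
        omega
      exact ic hflag k hkd l' x h1' (by omega)
    · exact id hflag k x hkd h
theorem pvReachB_keys (devices : List (String × List String))
    (hnd : (devices.map (fun p => p.1)).Nodup) :
    (pvReachB devices).keys = (PySem.Dict.mk devices).keys :=
  (pvIterB_props devices hnd devices.length).1

theorem pvReachB_val_key (devices : List (String × List String))
    (hnd : (devices.map (fun p => p.1)).Nodup) (k : String)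
    (hk : k ∈ devices.map (fun p => p.1)) (t : String)
    (ht : t ∈ (pvReachB devices).getD k []) : (pvReachB devices).contains t = true := by
  have hr := (pvReachB_char devices hnd k hk t).mp ht
  have hdt : (PySem.Dict.mk devices).contains t = true := by
    rcases Relation.ReflTransGen.cases_tail hr with rfl | ⟨c, _, hct⟩
    · exact (pvContains_mk_mem devices t).mpr hk
    · exact hct.2
  rw [PySem.Dict.contains_iff_mem_keys, pvReachB_keys devices hnd]
  exact (PySem.Dict.contains_iff_mem_keys _ _).mp hdt

-- ----- the per-entry predicates of A and of B agree (path reversal) -----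
theorem pvPred_eq (devices : List (String × List String))
    (hnd : (devices.map (fun p => p.1)).Nodup) (k : String)
    (hk : k ∈ devices.map (fun p => p.1)) (t : String) :
    ((pvRevGraph devices).contains t
      && decide (k ∈ pvPopA (pvRevGraph devices) (PySem.Set.ofList [t]) [t]))
    = ((pvReachB devices).getD k []).contains t := by
  apply Bool.eq_iff_iff.mpr
  have hL : ((pvRevGraph devices).contains t
      && decide (k ∈ pvPopA (pvRevGraph devices) (PySem.Set.ofList [t]) [t])) = true
      ↔ ((PySem.Dict.mk devices).contains t = true
          ∧ k ∈ pvVisA (pvRevGraph devices) (PySem.Set.ofList [t]) [t]) := by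
    rw [Bool.and_eq_true, decide_eq_true_iff, pvRG_contains, pvPopA_eq_vis]
  have hR : ((pvReachB devices).getD k []).contains t = true
      ↔ Relation.ReflTransGen (pvE (PySem.Dict.mk devices)) k t := by
    rw [← pvReachB_char devices hnd k hk t]
    simp [PySem.Set.contains]
  rw [hL, hR, pvVisA_char]
  have hswap : Relation.ReflTransGen
      (fun u w => w ∈ (pvRevGraph devices).getD u []) t k
      ↔ Relation.ReflTransGen (pvE (PySem.Dict.mk devices)) k t := by
    constructor
    · intro h
      exact Relation.reflTransGen_swap.mp
        (Relation.ReflTransGen.mono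
          (fun a b hab => (pvRG_mem devices hnd a b).mp hab) h)
    · intro h
      have h2 : Relation.ReflTransGen (Function.swap (pvE (PySem.Dict.mk devices))) t k :=
        Relation.reflTransGen_swap.mpr h
      exact Relation.ReflTransGen.mono
        (fun a b hab => (pvRG_mem devices hnd a b).mpr hab) h2
  rw [hswap]
  constructor
  · exact fun h => h.2
  · intro h
    refine ⟨?_, h⟩
    rcases Relation.ReflTransGen.cases_tail h with rfl | ⟨c, _, hct⟩
    · exact (pvContains_mk_mem devices t).mpr hk
    · exact hct.2

-- ----- final assembly -----
theorem pvMain (devices : List (String × List String)) (targets : List String)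
    (hnd : (devices.map (fun p => p.1)).Nodup) (hts : targets.Nodup) :
    precompute_reachable_targets devices targets
      = precompute_reachable_targets_alt devices targets := by
  unfold precompute_reachable_targets
  rw [pvAltB_eq]
  simp only []
  -- seed dict facts (A side)
  have hr0items : (devices.foldl (fun d p => d.insert p.1 (PySem.Set.empty : PySem.Set String))
      PySem.Dict.empty).items = devices.map (fun p => (p.1, (PySem.Set.empty : PySem.Set String))) := by
    have := PySem.Dict.items_foldl_insert_fresh devices (fun p => p.1)
      (fun _ => (PySem.Set.empty : PySem.Set String)) PySem.Dict.empty
      (fun a _ => PySem.Dict.contains_empty _) hnd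
    simpa using this
  have hr0keys : (devices.foldl (fun d p => d.insert p.1 (PySem.Set.empty : PySem.Set String))
      PySem.Dict.empty).keys = devices.map (fun p => p.1) := by
    simp only [PySem.Dict.keys, hr0items, List.map_map]
    rfl
  have hr0getD : ∀ k, (devices.foldl (fun d p => d.insert p.1 (PySem.Set.empty : PySem.Set String))
      PySem.Dict.empty).getD k [] = [] := by
    intro k
    rcases pvSeed_getD devices (PySem.Set.empty : PySem.Set String) [] PySem.Dict.empty k
      (Or.inr (PySem.Dict.getD_empty k [])) with h | h <;> exact h
  obtain ⟨hA, hAk⟩ := pvTargetsFold devices hnd targets hts _ hr0keys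
    (fun k t' _ => by rw [hr0getD k]; simp)
  -- A's items
  rw [PySem.Dict.items_eq_map_keys _ (by rw [hAk]; exact hnd) [], hAk]
  -- B's items
  have hBitems := PySem.Dict.items_foldl_insert_fresh devices (fun p => p.1)
    (fun p => PySem.Set.ofList ((targets.filter (fun t => (pvReachB devices).contains t)).filter
      (fun t => ((pvReachB devices).getD p.1 []).contains t)))
    PySem.Dict.empty (fun a _ => PySem.Dict.contains_empty _) hnd
  simp only [] at hBitems
  rw [hBitems]
  have hBmap : devices.map (fun p => (p.1, PySem.Set.ofList
      ((targets.filter (fun t => (pvReachB devices).contains t)).filter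
        (fun t => ((pvReachB devices).getD p.1 []).contains t))))
      = (devices.map (fun p => p.1)).map (fun k => (k, PySem.Set.ofList
        ((targets.filter (fun t => (pvReachB devices).contains t)).filter
          (fun t => ((pvReachB devices).getD k []).contains t)))) := by
    rw [List.map_map]
    rfl
  rw [hBmap]
  show List.map _ (devices.map (fun p => p.1)) = List.map _ (devices.map (fun p => p.1))
  apply List.map_congr_left
  intro k hkmem
  have hval : (targets.foldl (fun reachable target =>
      if (pvRevGraph devices).contains target then
        pvBfsA (pvRevGraph devices) target (PySem.Set.ofList [target]) [target] reachable
      else reachable) (devices.foldl (fun d p => d.insert p.1 (PySem.Set.empty : PySem.Set String))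
        PySem.Dict.empty)).getD k []
      = (targets.filter (fun t => (pvReachB devices).contains t)).filter
          (fun t => ((pvReachB devices).getD k []).contains t) := by
    rw [List.filter_filter, hA k, hr0getD k, List.nil_append]
    apply List.filter_congr
    intro t _
    rw [pvPred_eq devices hnd k hkmem t]
    rcases hQ : ((pvReachB devices).getD k []).contains t with _ | _
    · simp
    · have htm : t ∈ (pvReachB devices).getD k [] := by
        have := hQ
        simp only [PySem.Set.contains_eq_listContains] at this
        simpa using this
      rw [pvReachB_val_key devices hnd k hkmem t htm]
      rfl
  rw [hval, PySem.Set.ofList_eq_self_of_nodup _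
    (List.Nodup.filter _ (List.Nodup.filter _ hts))]

-- ===== VERDICT (by name: the statement is the Claim_ definition above) =====
theorem precompute_reachable_targets_spec : Claim_equal_precompute_reachable_targets := by
  intro devices targets _ hpre
  unfold Spec_precompute_reachable_targets
  exact pvMain devices targets hpre.1 hpre.2
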